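-- pv_equiv track=rewrite | github.com/dantejosh/empath-brain | app.py | simple_sentiment_score
-- ===== SOURCE A (Python) =====
-- POSITIVE_WORDS = {
--     "growth", "gain", "recovery", "progress", "peace",
--     "stability", "innovation", "agreement", "support", "improve"
-- }
--
-- NEGATIVE_WORDS = {
--     "war", "conflict", "crisis", "decline", "loss",
--     "fear", "violence", "collapse", "threat", "recession"
-- }
--
-- def simple_sentiment_score(text):
--     """Very lightweight, deterministic sentiment scoring."""
--     if not text:
--         return 0
--
--     words = text.lower().split()
--     score = 0
--
--     for w in words:
--         if w in POSITIVE_WORDS: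
--             score += 1
--         if w in NEGATIVE_WORDS:
--             score -= 1
--
--     return score
-- ===== SOURCE B (Python) =====
-- POSITIVE_WORDS = [
--     "growth", "gain", "recovery", "progress", "peace",
--     "stability", "innovation", "agreement", "support", "improve"
-- ]
--
-- NEGATIVE_WORDS = [
--     "war", "conflict", "crisis", "decline", "loss",
--     "fear", "violence", "collapse", "threat", "recession"
-- ]
--
-- def simple_sentiment_score(text):
--     """Very lightweight, deterministic sentiment scoring."""
--     if not text:
--         return 0
--
--     freq = {}
--     for w in text.lower().split():
--         freq[w] = freq.get(w, 0) + 1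
--
--     return sum(freq.get(w, 0) for w in POSITIVE_WORDS) - \
--            sum(freq.get(w, 0) for w in NEGATIVE_WORDS)
-- ===== Notes on version B (the rewrite author's own statement) =====
-- stated objective: alternative
-- what changed: B builds a frequency table of the words in one pass and then scores by iterating over the fixed sentiment vocabularies (sum of positive counts minus sum of negative counts), instead of A's per-word branch-and-accumulate loop over the text.
import Mathlib
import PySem

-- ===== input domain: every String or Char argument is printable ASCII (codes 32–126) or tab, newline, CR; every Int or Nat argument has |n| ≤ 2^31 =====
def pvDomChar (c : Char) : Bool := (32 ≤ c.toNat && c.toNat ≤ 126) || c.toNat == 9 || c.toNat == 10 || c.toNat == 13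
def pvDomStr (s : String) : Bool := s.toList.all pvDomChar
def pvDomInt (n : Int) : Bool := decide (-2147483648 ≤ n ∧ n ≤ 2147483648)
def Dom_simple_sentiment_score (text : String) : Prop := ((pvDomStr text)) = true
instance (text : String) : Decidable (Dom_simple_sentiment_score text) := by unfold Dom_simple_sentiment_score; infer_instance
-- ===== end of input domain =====

-- B tabulates word frequencies once and scores by scanning the fixed vocabularies; alternative decomposition, same cost.

-- shared module constants (the two fixed sentiment vocabularies)
def pvPOS : List String :=
  ["growth", "gain", "recovery", "progress", "peace",
   "stability", "innovation", "agreement", "support", "improve"]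

def pvNEG : List String :=
  ["war", "conflict", "crisis", "decline", "loss",
   "fear", "violence", "collapse", "threat", "recession"]

-- ===== PORT A =====
def simple_sentiment_score (text : String) : Int :=
  if text = "" then 0
  else
    let words := PySem.Str.split₀ (PySem.Str.lower text)
    words.foldl (fun score w =>
      let score := if pvPOS.contains w then score + 1 else score
      if pvNEG.contains w then score - 1 else score) 0

-- ===== PORT B =====
def simple_sentiment_score_alt (text : String) : Int :=
  if text = "" then 0
  else
    let freq : PySem.Dict String Int :=
      (PySem.Str.split₀ (PySem.Str.lower text)).foldl
        (fun d w => d.insert w (d.getD w 0 + 1)) PySem.Dict.empty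
    (pvPOS.map (fun w => freq.getD w 0)).sum - (pvNEG.map (fun w => freq.getD w 0)).sum

-- ===== PRECONDITION & SPEC =====
def Spec_simple_sentiment_score (text : String) (out : Int) : Prop := out = simple_sentiment_score_alt text
instance (text : String) (out : Int) : Decidable (Spec_simple_sentiment_score text out) := by unfold Spec_simple_sentiment_score; infer_instance

-- ===== CLAIM (what is proved, stated in full; the proofs are below) =====
def Claim_equal_simple_sentiment_score : Prop := ∀ (text : String), Dom_simple_sentiment_score text → Spec_simple_sentiment_score text (simple_sentiment_score text)

-- ===== LEMMAS AND PROOFS =====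

-- Σ_{p ∈ ps} count p (w::l) = Σ_{p ∈ ps} count p l + [w ∈ ps], for a duplicate-free vocabulary ps
theorem pv_sum_count_cons (ps : List String) (h : ps.Nodup) (w : String) (l : List String) :
    (ps.map fun p => ((w :: l).count p : Int)).sum
      = (ps.map fun p => (l.count p : Int)).sum + (if ps.contains w then 1 else 0) := by
  induction ps with
  | nil => simp
  | cons p ps ih =>
    simp only [List.nodup_cons] at h
    rw [List.map_cons, List.map_cons, List.sum_cons, List.sum_cons, ih h.2, List.count_cons]
    simp only [List.contains_cons]
    by_cases hw : w = p
    · subst hw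
      simp [List.contains_eq_mem, h.1]
      try ring
    · have hb' : (w == p) = false := by simp [hw]
      simp [hb']
      try (split_ifs <;> first | contradiction | ring)

-- the fold A runs equals vocabulary-sum of counts (positive minus negative)
theorem pv_fold_eq_counts (ws : List String) (a : Int) :
    ws.foldl (fun score w =>
        let score := if pvPOS.contains w then score + 1 else score
        if pvNEG.contains w then score - 1 else score) a
      = a + (pvPOS.map fun p => ((ws.count p : Int))).sum
          - (pvNEG.map fun p => ((ws.count p : Int))).sum := by
  induction ws generalizing a with
  | nil => simp
  | cons w ws ih =>
    rw [List.foldl_cons, ih, pv_sum_count_cons pvPOS (by decide) w ws,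
        pv_sum_count_cons pvNEG (by decide) w ws]
    simp only
    split_ifs <;> ring

-- ===== VERDICT (by name: the statement is the Claim_ definition above) =====
theorem simple_sentiment_score_spec : Claim_equal_simple_sentiment_score := by
  intro text _
  unfold Spec_simple_sentiment_score simple_sentiment_score simple_sentiment_score_alt
  by_cases h : text = ""
  · simp [h]
  · simp only [h, if_false]
    rw [pv_fold_eq_counts]
    simp [PySem.Dict.getD_foldl_insert_add_one]
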